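-- pv_equiv track=rewrite | github.com/mima3/tokuraku | create_passanger.py | analyze_year_row
-- ===== SOURCE A (Python) =====
-- def analyze_year_row(row):
--     ret = {}
--     type = [
--       'commuterPass',
--       'other',
--       'sum',
--       'yearOnYear'
--     ]
--     pre_year = 0
--     ix = 0
--     for i in range(len(row)):
--         if i >= 2:
--             if pre_year != row[i]:
--                 ix = 0
--             ret[i] = (row[i], type[ix])
--             pre_year = row[i]
--             ix = ix + 1
--     return ret
-- ===== SOURCE B (Python) =====
-- def analyze_year_row(row):
--     # Two-level decomposition: for each column >= 2, find the start of its
--     # maximal run of equal values by scanning backwards, then label it by its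
--     # offset within that run.  No running state is carried between columns.
--     types = ['commuterPass', 'other', 'sum', 'yearOnYear']
--
--     def run_start(i):
--         j = i
--         while j > 2 and row[j - 1] == row[i]:
--             j -= 1
--         return j
--
--     return {i: (row[i], types[i - run_start(i)]) for i in range(2, len(row))}
-- ===== Notes on version B (the rewrite author's own statement) =====
-- stated objective: alternative
-- what changed: Replaced A's single flat loop carrying a manually-reset run counter and previous-value state by a stateless per-column dict comprehension: each column i >= 2 independently maps to (row[i], types[i - run_start(i)]), where run_start scans backwards to the start of i's run of equal values.
import Mathlib
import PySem

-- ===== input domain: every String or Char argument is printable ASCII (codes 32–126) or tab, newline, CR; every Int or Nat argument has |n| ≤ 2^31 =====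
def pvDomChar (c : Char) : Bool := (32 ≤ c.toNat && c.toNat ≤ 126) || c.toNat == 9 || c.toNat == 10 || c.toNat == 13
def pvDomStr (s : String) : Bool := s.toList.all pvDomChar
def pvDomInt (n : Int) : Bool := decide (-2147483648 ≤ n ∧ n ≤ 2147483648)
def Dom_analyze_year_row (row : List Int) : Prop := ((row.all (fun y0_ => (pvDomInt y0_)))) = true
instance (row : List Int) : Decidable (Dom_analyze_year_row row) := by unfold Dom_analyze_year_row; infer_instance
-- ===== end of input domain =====

-- B replaces A's single stateful loop (manually-reset run counter) by a stateless per-column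
-- computation: each column i ≥ 2 independently gets (row[i], types[i - run_start(i)]) where
-- run_start scans backwards for the start of i's run of equal values (objective: alternative).

-- ===== PORT A =====
-- one loop step of A: for i in range(len(row)): if i >= 2: …
def pvStepA (row : List Int) (s : PySem.Dict Int (Int × String) × Int × Int) (i : Int) :
    PySem.Dict Int (Int × String) × Int × Int :=
  if 2 ≤ i then
    let typ : List String := ["commuterPass", "other", "sum", "yearOnYear"]
    let v := (PySem.List.pyGet? row i).getD 0          -- row[i]; i ∈ range(len(row)) so always in range
    let ix := if s.2.1 ≠ v then 0 else s.2.2            -- if pre_year != row[i]: ix = 0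
    -- type[ix] raises IndexError when ix > 3 (a run of ≥ 5 equal values); Pre_ excludes that, .getD "" is never reached there
    (s.1.insert i (v, (PySem.List.pyGet? typ ix).getD ""), v, ix + 1)
  else s

def analyze_year_row (row : List Int) : List (Int × Int × String) :=
  ((PySem.List.pyRange 0 (row.length : Int) 1).foldl (pvStepA row) (PySem.Dict.empty, 0, 0)).1.items

-- ===== PORT B =====
-- run_start(i): while j > 2 and row[j-1] == row[i]: j -= 1
def pvRunStart (row : List Int) (i : Int) (j : Int) : Int :=
  if h : 2 < j ∧ (PySem.List.pyGet? row (j - 1)).getD 0 = (PySem.List.pyGet? row i).getD 0 then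
    pvRunStart row i (j - 1)
  else j
termination_by j.toNat
decreasing_by omega

-- one entry of B's dict comprehension
def pvEntry (row : List Int) (i : Int) : Int × Int × String :=
  let typ : List String := ["commuterPass", "other", "sum", "yearOnYear"]
  (i, (PySem.List.pyGet? row i).getD 0,
      (PySem.List.pyGet? typ (i - pvRunStart row i i)).getD "")   -- types[…] raises for runs ≥ 5; excluded by Pre_

def analyze_year_row_alt (row : List Int) : List (Int × Int × String) :=
  (PySem.List.pyRange 2 (row.length : Int) 1).map (pvEntry row)

-- ===== PRECONDITION & SPEC =====
-- On a row with 5 or more consecutive equal values from index 2 on, Python A raises IndexError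
-- (type[ix] with ix = 4), and Python B raises the same way; Pre_ excludes exactly those rows.
def Pre_analyze_year_row (row : List Int) : Prop :=
  ∀ j < row.length, 2 ≤ j → j + 4 < row.length →
    ¬ (row.getD j 0 = row.getD (j+1) 0 ∧ row.getD (j+1) 0 = row.getD (j+2) 0 ∧
       row.getD (j+2) 0 = row.getD (j+3) 0 ∧ row.getD (j+3) 0 = row.getD (j+4) 0)
instance (row : List Int) : Decidable (Pre_analyze_year_row row) := by unfold Pre_analyze_year_row; infer_instance

def pvWitness_analyze_year_row : List Int := [10, 20, 7, 7, 5, 5, 5, 5, 9]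

def Spec_analyze_year_row (row : List Int) (out : List (Int × Int × String)) : Prop := out = analyze_year_row_alt row
instance (row : List Int) (out : List (Int × Int × String)) : Decidable (Spec_analyze_year_row row out) := by unfold Spec_analyze_year_row; infer_instance

-- ===== CLAIM (what is proved, stated in full; the proofs are below) =====
def Claim_equal_analyze_year_row : Prop := ∀ (row : List Int), Dom_analyze_year_row row → Pre_analyze_year_row row → Spec_analyze_year_row row (analyze_year_row row)

-- ===== LEMMAS AND PROOFS =====

-- pvRunStart only reads the VALUE row[i], so two columns holding equal values have equal scans
lemma pvRunStart_congr (row : List Int) (i i' : Int)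
    (h : (PySem.List.pyGet? row i).getD 0 = (PySem.List.pyGet? row i').getD 0) (j : Int) :
    pvRunStart row i j = pvRunStart row i' j := by
  generalize hn : j.toNat = n
  induction n using Nat.strong_induction_on generalizing j with
  | _ n ih =>
    conv_lhs => rw [pvRunStart]
    conv_rhs => rw [pvRunStart]
    rw [h]
    split_ifs with hc
    · exact ih (j - 1).toNat (by omega) (j - 1) rfl
    · rfl

-- inserting a fresh key into a literal dict appends the pair
lemma pvInsertFresh (L : List (Int × Int × String)) (k : Int) (v : Int × String)
    (hk : k ∉ L.map (·.1)) :
    (PySem.Dict.mk L).insert k v = PySem.Dict.mk (L ++ [(k, v)]) := by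
  apply PySem.Dict.ext
  rw [PySem.Dict.items_insert_of_not_contains]
  rw [PySem.Dict.contains_mk]
  simp only [List.any_eq_false, beq_iff_eq]
  intro p hp
  exact fun e => hk (e ▸ List.mem_map_of_mem hp)

-- A's pre_year after processing indices < m
def pvPreV (row : List Int) (m : Nat) : Int :=
  if m ≤ 2 then 0 else (PySem.List.pyGet? row ((m : Int) - 1)).getD 0

-- A's ix after processing indices < m, expressed through B's run start
def pvIxV (row : List Int) (m : Nat) : Int :=
  if m ≤ 2 then 0 else ((m : Int) - 1) - pvRunStart row ((m : Int) - 1) ((m : Int) - 1) + 1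

-- the loop invariant: after the first m iterations A's state is exactly B's first entries
lemma pv_inv (row : List Int) (m : Nat) :
    (PySem.List.pyRange 0 (m : Int) 1).foldl (pvStepA row) (PySem.Dict.empty, 0, 0) =
      (PySem.Dict.mk ((PySem.List.pyRange 2 (m : Int) 1).map (pvEntry row)),
        pvPreV row m, pvIxV row m) := by
  induction m with
  | zero =>
      simp [PySem.List.pyRange_one_eq_nil, pvPreV, pvIxV]
      rfl
  | succ m ih =>
      have hcast : ((m + 1 : Nat) : Int) = (m : Int) + 1 := by push_cast; ring
      rw [hcast, PySem.List.pyRange_one_succ_right (by positivity)]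
      rw [List.foldl_append, ih]
      by_cases h2 : m < 2
      · interval_cases m
        · simp [pvStepA, pvPreV, pvIxV, PySem.List.pyRange_one_eq_nil]
        · simp [pvStepA, pvPreV, pvIxV, PySem.List.pyRange_one_eq_nil]
      · -- m ≥ 2 : the step fires
        have h2 : 2 ≤ m := by omega
        have hm2 : (2 : Int) ≤ (m : Int) := by exact_mod_cast h2
        have hE : (if pvPreV row m ≠ (PySem.List.pyGet? row (m : Int)).getD 0 then 0 else pvIxV row m)
            = (m : Int) - pvRunStart row (m : Int) (m : Int) := by
          rcases Nat.eq_or_lt_of_le h2 with h2eq | h2lt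
          · -- m = 2 : ix is 0 either way, and the backward scan stops at once
            subst h2eq
            rw [pvRunStart]
            simp [pvPreV, pvIxV]
          · -- m ≥ 3
            have hm3 : ¬ m ≤ 2 := by omega
            by_cases hv : (PySem.List.pyGet? row ((m : Int) - 1)).getD 0
                = (PySem.List.pyGet? row (m : Int)).getD 0
            · -- same value as the previous column: same run
              have hrs : pvRunStart row (m : Int) (m : Int)
                  = pvRunStart row ((m : Int) - 1) ((m : Int) - 1) := by
                rw [pvRunStart]
                rw [dif_pos ⟨by exact_mod_cast h2lt, hv⟩]
                exact pvRunStart_congr row (m : Int) ((m : Int) - 1) hv.symm ((m : Int) - 1)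
              simp only [pvPreV, pvIxV, if_neg hm3, ne_eq, hv, not_true_eq_false, if_false, hrs]
              ring
            · -- different value: run restarts at m
              have hrs : pvRunStart row (m : Int) (m : Int) = (m : Int) := by
                rw [pvRunStart]
                rw [dif_neg (by rintro ⟨-, he⟩; exact hv he)]
              simp only [pvPreV, pvIxV, if_neg hm3, ne_eq, hv, not_false_eq_true, if_true, hrs]
              ring
        simp only [List.foldl_cons, List.foldl_nil, pvStepA, if_pos hm2]
        have hfresh : (PySem.Dict.mk ((PySem.List.pyRange 2 (m : Int) 1).map (pvEntry row))).insert
              (m : Int) ((PySem.List.pyGet? row (m : Int)).getD 0,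
                (PySem.List.pyGet? ["commuterPass", "other", "sum", "yearOnYear"]
                  (if pvPreV row m ≠ (PySem.List.pyGet? row (m : Int)).getD 0 then 0 else pvIxV row m)).getD "")
            = PySem.Dict.mk (((PySem.List.pyRange 2 (m : Int) 1).map (pvEntry row)) ++
                [pvEntry row (m : Int)]) := by
          rw [hE]
          have hnm : (m : Int) ∉ ((PySem.List.pyRange 2 (m : Int) 1).map (pvEntry row)).map (·.1) := by
            simp only [List.map_map, List.mem_map, Function.comp]
            rintro ⟨x, hx, hx1⟩
            rw [PySem.List.mem_pyRange_one] at hx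
            simp only [pvEntry] at hx1
            omega
          rw [pvInsertFresh _ _ _ hnm]
          rfl
        have hrange : (PySem.List.pyRange 2 ((m : Int) + 1) 1).map (pvEntry row)
            = (PySem.List.pyRange 2 (m : Int) 1).map (pvEntry row) ++ [pvEntry row (m : Int)] := by
          rw [PySem.List.pyRange_one_succ_right hm2, List.map_append]
          rfl
        rw [hfresh]
        refine Prod.ext (congrArg PySem.Dict.mk hrange.symm) (Prod.ext ?_ ?_)
        · -- new pre_year
          simp only [pvPreV, if_neg (by omega : ¬ m + 1 ≤ 2)]
          norm_num [hcast]
        · -- new ix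
          dsimp only
          rw [hE]
          simp only [pvIxV, if_neg (by omega : ¬ m + 1 ≤ 2)]
          rw [show ((m + 1 : Nat) : Int) - 1 = (m : Int) from by push_cast; ring]

-- ===== VERDICT (by name: the statement is the Claim_ definition above) =====
theorem analyze_year_row_spec : Claim_equal_analyze_year_row := by
  intro row _ _
  show analyze_year_row row = analyze_year_row_alt row
  unfold analyze_year_row analyze_year_row_alt
  rw [pv_inv row row.length]
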